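-- pv_equiv track=rewrite | github.com/jameelk809/foobar | codevita 26mar/class arrangement 2.py | clsarrange
-- ===== SOURCE A (Python) =====
-- def clsarrange(s):
--     N = len(s)
--     g = 0
--     b = 0
--     for i in range(N):
--         if s[i] == 'G':
--             g += 1
--         else:
--             b += 1
--     if g > b + 1 or b > g + 1:
--         return -1
--     if N % 2:
--         num = (N + 1) / 2
--         g_even = 0
--         b_even = 0
--         for i in range(N):
--             if i % 2 == 0:
--                 if s[i] == 'G':
--                     g_even += 1
--                 else:
--                     b_even += 1
--         if g > b:
--             return int(num - g_even)
--         else: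
--             return int(num - b_even)
--     else:
--         g_odd = 0
--         g_even = 0
--         for i in range(N):
--             if s[i] == 'G':
--                 if i % 2:
--                     g_odd += 1
--                 else:
--                     g_even += 1
--         return min(N // 2 - g_odd, N // 2 - g_even)
-- ===== SOURCE B (Python) =====
-- def clsarrange(s):
--     # classify disjoint adjacent pairs; closed-form answer from the four pair counts
--     gg = gb = bg = bb = 0
--     last = None
--     it = iter(s)
--     for a in it:
--         c = next(it, None)
--         if c is None:
--             last = a
--             break
--         ag = a == 'G'
--         cg = c == 'G'
--         if ag and cg:
--             gg += 1
--         elif ag: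
--             gb += 1
--         elif cg:
--             bg += 1
--         else:
--             bb += 1
--     if last is None:
--         return min(gb, bg) + gg if gg == bb else -1
--     if last == 'G':
--         if gg == bb:
--             return bg + gg
--         if bb == gg + 1:
--             return gb + gg + 1
--     else:
--         if gg == bb:
--             return gb + gg
--         if gg == bb + 1:
--             return bg + bb + 1
--     return -1
-- ===== Notes on version B (the rewrite author's own statement) =====
-- stated objective: alternative
-- what changed: B walks the string two characters at a time, classifying each disjoint adjacent pair as GG/GB/BG/BB (plus an optional leftover char), and reads the answer off the four pair counts by a closed-form case table, replacing A's per-index parity-class counters and subtraction formulas.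
import Mathlib
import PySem

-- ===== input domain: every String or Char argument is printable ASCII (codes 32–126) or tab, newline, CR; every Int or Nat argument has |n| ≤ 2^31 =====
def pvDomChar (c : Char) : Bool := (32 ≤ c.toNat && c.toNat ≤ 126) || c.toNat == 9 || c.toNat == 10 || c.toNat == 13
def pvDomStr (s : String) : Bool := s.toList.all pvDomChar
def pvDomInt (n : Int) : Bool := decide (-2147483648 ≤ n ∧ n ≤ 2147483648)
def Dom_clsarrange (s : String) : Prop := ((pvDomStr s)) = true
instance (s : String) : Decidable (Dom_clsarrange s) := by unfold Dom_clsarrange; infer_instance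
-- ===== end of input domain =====

-- B classifies disjoint adjacent pairs (GG/GB/BG/BB, plus a leftover char) in one
-- two-at-a-time pass and reads the answer off the four pair counts by a closed-form
-- case table, replacing A's per-index parity-class counters; objective: alternative.

-- ===== PORT A =====
def clsarrange (s : String) : Int :=
  let cs := s.toList
  let N : Int := cs.length
  let gb := cs.foldl (fun (p : Int × Int) c => if c = 'G' then (p.1 + 1, p.2) else (p.1, p.2 + 1)) (0, 0)
  let g := gb.1
  let b := gb.2
  if g > b + 1 ∨ b > g + 1 then -1
  else if N % 2 ≠ 0 then
    -- Python computes num = (N + 1) / 2 with float '/'; exact here since N + 1 is even and nonnegative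
    let num := (N + 1) / 2
    let ev := cs.zipIdx.foldl (fun (p : Int × Int) ci =>
        if ci.2 % 2 = 0 then (if ci.1 = 'G' then (p.1 + 1, p.2) else (p.1, p.2 + 1)) else p) (0, 0)
    if g > b then num - ev.1 else num - ev.2
  else
    let go := cs.zipIdx.foldl (fun (p : Int × Int) ci =>
        if ci.1 = 'G' then (if ci.2 % 2 ≠ 0 then (p.1 + 1, p.2) else (p.1, p.2 + 1)) else p) (0, 0)
    min (PySem.Int.floordiv N 2 - go.1) (PySem.Int.floordiv N 2 - go.2)

-- ===== PORT B =====
-- Source B's pair loop: consume the characters two at a time, classifying each disjoint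
-- pair as GG/GB/BG/BB; a lone trailing character is returned as the leftover.
def pvPairs : List Char → Int → Int → Int → Int → (Int × Int × Int × Int) × Option Char
  | [], gg, gb, bg, bb => ((gg, gb, bg, bb), none)
  | [a], gg, gb, bg, bb => ((gg, gb, bg, bb), some a)
  | a :: c :: t, gg, gb, bg, bb =>
    if a = 'G' ∧ c = 'G' then pvPairs t (gg + 1) gb bg bb
    else if a = 'G' then pvPairs t gg (gb + 1) bg bb
    else if c = 'G' then pvPairs t gg gb (bg + 1) bb
    else pvPairs t gg gb bg (bb + 1)

def clsarrange_alt (s : String) : Int :=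
  let r := pvPairs s.toList 0 0 0 0
  let gg := r.1.1
  let gb := r.1.2.1
  let bg := r.1.2.2.1
  let bb := r.1.2.2.2
  match r.2 with
  | none => if gg = bb then min gb bg + gg else -1
  | some lc =>
    if lc = 'G' then
      if gg = bb then bg + gg
      else if bb = gg + 1 then gb + gg + 1
      else -1
    else
      if gg = bb then gb + gg
      else if gg = bb + 1 then bg + bb + 1
      else -1

-- ===== PRECONDITION & SPEC =====
def Spec_clsarrange (s : String) (out : Int) : Prop := out = clsarrange_alt s
instance (s : String) (out : Int) : Decidable (Spec_clsarrange s out) := by unfold Spec_clsarrange; infer_instance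

-- ===== CLAIM (what is proved, stated in full; the proofs are below) =====
def Claim_equal_clsarrange : Prop := ∀ (s : String), Dom_clsarrange s → Spec_clsarrange s (clsarrange s)

-- ===== LEMMAS AND PROOFS =====

-- the four parity-class counters; p is the parity flag of the first position (true = even index)
def gEq : List Char → Bool → Int
  | [], _ => 0
  | c :: t, p => gEq t (!p) + (if c = 'G' ∧ p then 1 else 0)
def gOq : List Char → Bool → Int
  | [], _ => 0
  | c :: t, p => gOq t (!p) + (if c = 'G' ∧ ¬p then 1 else 0)
def bEq : List Char → Bool → Int
  | [], _ => 0
  | c :: t, p => bEq t (!p) + (if c ≠ 'G' ∧ p then 1 else 0)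
def bOq : List Char → Bool → Int
  | [], _ => 0
  | c :: t, p => bOq t (!p) + (if c ≠ 'G' ∧ ¬p then 1 else 0)

theorem quad_nonneg (cs : List Char) (p : Bool) :
    0 ≤ gEq cs p ∧ 0 ≤ gOq cs p ∧ 0 ≤ bEq cs p ∧ 0 ≤ bOq cs p := by
  induction cs generalizing p with
  | nil => simp [gEq, gOq, bEq, bOq]
  | cons c t ih =>
    obtain ⟨h1, h2, h3, h4⟩ := ih (!p)
    simp only [gEq, gOq, bEq, bOq]
    split_ifs <;> omega

theorem quad_sum (cs : List Char) (p : Bool) :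
    gEq cs p + gOq cs p + bEq cs p + bOq cs p = (cs.length : Int) := by
  induction cs generalizing p with
  | nil => simp [gEq, gOq, bEq, bOq]
  | cons c t ih =>
    have h := ih (!p)
    simp only [gEq, gOq, bEq, bOq, List.length_cons]
    push_cast
    by_cases hc : c = 'G' <;> cases p <;> simp [hc] at h ⊢ <;> omega

-- there is one more even-parity slot than odd-parity slots iff the length is odd (for p = true)
theorem quad_parity (cs : List Char) (p : Bool) :
    gEq cs p + bEq cs p - (gOq cs p + bOq cs p)
      = (if cs.length % 2 = 0 then 0 else if p then 1 else -1) := by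
  induction cs generalizing p with
  | nil => simp [gEq, gOq, bEq, bOq]
  | cons c t ih =>
    have h := ih (!p)
    simp only [gEq, gOq, bEq, bOq, List.length_cons]
    by_cases hc : c = 'G' <;> cases p <;> simp [hc] at h ⊢ <;>
      (split_ifs at h ⊢ <;> omega)

-- A's first loop: total G / non-G counts
theorem fold_gb (cs : List Char) (p : Bool) (g0 b0 : Int) :
    cs.foldl (fun (q : Int × Int) c => if c = 'G' then (q.1 + 1, q.2) else (q.1, q.2 + 1)) (g0, b0)
      = (g0 + gEq cs p + gOq cs p, b0 + bEq cs p + bOq cs p) := by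
  induction cs generalizing p g0 b0 with
  | nil => simp [gEq, gOq, bEq, bOq]
  | cons c t ih =>
    simp only [List.foldl_cons, gEq, gOq, bEq, bOq]
    by_cases hc : c = 'G' <;> cases p <;> simp [hc]
    all_goals first
      | rfl
      | (rw [ih true]; refine Prod.ext ?_ ?_ <;> simp <;> omega)
      | (rw [ih true]; done)
      | (rw [ih false]; refine Prod.ext ?_ ?_ <;> simp <;> omega)

-- parity of the index flips from n to n + 1
theorem flip_parity (n : Nat) : (decide ((n + 1) % 2 = 0)) = !(decide (n % 2 = 0)) := by
  have h : n % 2 = 0 ∨ n % 2 = 1 := by omega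
  rcases h with h | h <;> simp [Nat.add_mod, h]

-- A's odd-case loop: even-index G / non-G counts
theorem fold_even (cs : List Char) (n : Nat) (a b : Int) :
    (cs.zipIdx n).foldl (fun (q : Int × Int) ci =>
        if ci.2 % 2 = 0 then (if ci.1 = 'G' then (q.1 + 1, q.2) else (q.1, q.2 + 1)) else q) (a, b)
      = (a + gEq cs (decide (n % 2 = 0)), b + bEq cs (decide (n % 2 = 0))) := by
  induction cs generalizing n a b with
  | nil => simp [gEq, bEq]
  | cons c t ih =>
    simp only [List.zipIdx_cons, List.foldl_cons, gEq, bEq]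
    rw [ih (n + 1), flip_parity]
    by_cases hn : n % 2 = 0 <;> by_cases hc : c = 'G' <;>
      simp [hn, hc, Prod.mk.injEq] <;> omega

-- A's even-case loop: (g_odd, g_even)
theorem fold_godd (cs : List Char) (n : Nat) (a b : Int) :
    (cs.zipIdx n).foldl (fun (q : Int × Int) ci =>
        if ci.1 = 'G' then (if ci.2 % 2 ≠ 0 then (q.1 + 1, q.2) else (q.1, q.2 + 1)) else q) (a, b)
      = (a + gOq cs (decide (n % 2 = 0)), b + gEq cs (decide (n % 2 = 0))) := by
  induction cs generalizing n a b with
  | nil => simp [gEq, gOq]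
  | cons c t ih =>
    simp only [List.zipIdx_cons, List.foldl_cons, gEq, gOq]
    rw [ih (n + 1), flip_parity]
    by_cases hn : n % 2 = 0 <;> by_cases hc : c = 'G' <;>
      simp [hn, hc, Prod.mk.injEq] <;> omega

-- contribution of the leftover character (sits at an even index when it exists)
def pvLfG : Option Char → Int
  | none => 0
  | some c => if c = 'G' then 1 else 0
def pvLfB : Option Char → Int
  | none => 0
  | some c => if c = 'G' then 0 else 1
def pvPar : Option Char → Nat
  | none => 0
  | some _ => 1

-- the pair counters determine the parity-class counters (start parity = even)
theorem pairs_quad : ∀ (cs : List Char) (gg gb bg bb : Int),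
    gEq cs true = ((pvPairs cs gg gb bg bb).1.1 - gg) + ((pvPairs cs gg gb bg bb).1.2.1 - gb)
        + pvLfG (pvPairs cs gg gb bg bb).2
  ∧ gOq cs true = ((pvPairs cs gg gb bg bb).1.1 - gg) + ((pvPairs cs gg gb bg bb).1.2.2.1 - bg)
  ∧ bEq cs true = ((pvPairs cs gg gb bg bb).1.2.2.1 - bg) + ((pvPairs cs gg gb bg bb).1.2.2.2 - bb)
        + pvLfB (pvPairs cs gg gb bg bb).2
  ∧ bOq cs true = ((pvPairs cs gg gb bg bb).1.2.1 - gb) + ((pvPairs cs gg gb bg bb).1.2.2.2 - bb)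
  ∧ cs.length % 2 = pvPar (pvPairs cs gg gb bg bb).2
  | [], gg, gb, bg, bb => by
    simp [pvPairs, gEq, gOq, bEq, bOq, pvLfG, pvLfB, pvPar]
  | [a], gg, gb, bg, bb => by
    by_cases ha : a = 'G' <;>
      simp [pvPairs, gEq, gOq, bEq, bOq, pvLfG, pvLfB, pvPar, ha]
  | a :: c :: t, gg, gb, bg, bb => by
    by_cases hA : a = 'G' <;> by_cases hC : c = 'G'
    · obtain ⟨i1, i2, i3, i4, i5⟩ := pairs_quad t (gg + 1) gb bg bb
      simp only [pvPairs, if_pos (And.intro hA hC)]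
      simp [gEq, gOq, bEq, bOq, hA, hC, List.length_cons, Nat.add_mod]
      refine ⟨by omega, by omega, by omega, by omega, by omega⟩
    · obtain ⟨i1, i2, i3, i4, i5⟩ := pairs_quad t gg (gb + 1) bg bb
      simp only [pvPairs, if_neg (fun h : a = 'G' ∧ c = 'G' => hC h.2), if_pos hA]
      simp [gEq, gOq, bEq, bOq, hA, hC, List.length_cons, Nat.add_mod]
      refine ⟨by omega, by omega, by omega, by omega, by omega⟩
    · obtain ⟨i1, i2, i3, i4, i5⟩ := pairs_quad t gg gb (bg + 1) bb
      simp only [pvPairs, if_neg (fun h : a = 'G' ∧ c = 'G' => hA h.1), if_neg hA, if_pos hC]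
      simp [gEq, gOq, bEq, bOq, hA, hC, List.length_cons, Nat.add_mod]
      refine ⟨by omega, by omega, by omega, by omega, by omega⟩
    · obtain ⟨i1, i2, i3, i4, i5⟩ := pairs_quad t gg gb bg (bb + 1)
      simp only [pvPairs, if_neg (fun h : a = 'G' ∧ c = 'G' => hA h.1), if_neg hA, if_neg hC]
      simp [gEq, gOq, bEq, bOq, hA, hC, List.length_cons, Nat.add_mod]
      refine ⟨by omega, by omega, by omega, by omega, by omega⟩

-- ===== VERDICT (by name: the statement is the Claim_ definition above) =====
theorem clsarrange_spec : Claim_equal_clsarrange := by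
  intro s _
  unfold Spec_clsarrange clsarrange clsarrange_alt
  simp only [fold_gb s.toList true, fold_even s.toList 0, fold_godd s.toList 0,
    Nat.zero_mod, decide_true, zero_add,
    PySem.Int.floordiv_eq_ediv_of_pos (show (0 : Int) < 2 by norm_num)]
  have hsum := quad_sum s.toList true
  have hpar := quad_parity s.toList true
  obtain ⟨h1, h2, h3, h4⟩ := quad_nonneg s.toList true
  obtain ⟨p1, p2, p3, p4, p5⟩ := pairs_quad s.toList 0 0 0 0
  set r := pvPairs s.toList 0 0 0 0 with hr
  set gE := gEq s.toList true
  set gO := gOq s.toList true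
  set bE := bEq s.toList true
  set bO := bOq s.toList true
  set L := s.toList.length with hLdef
  rcases hlf : r.2 with _ | lc
  · -- even length
    simp only [hlf]
    rw [hlf] at p1 p3 p5
    simp only [pvLfG, pvLfB, pvPar] at p1 p3 p5
    have hLe : L % 2 = 0 := p5
    have hLe' : (L : Int) % 2 = 0 := by omega
    simp only [hLe] at hpar; norm_num at hpar
    rw [if_neg (show ¬ ((L : Int) % 2 ≠ 0) by omega)]
    by_cases hA : gE + gO > bE + bO + 1 ∨ bE + bO > gE + gO + 1
    · rw [if_pos hA]
      rw [if_neg (show ¬ r.1.1 = r.1.2.2.2 by omega)]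
    · rw [if_neg hA, if_pos (show r.1.1 = r.1.2.2.2 by omega)]
      omega
  · -- odd length: leftover char lc
    simp only [hlf]
    rw [hlf] at p1 p3 p5
    simp only [pvLfG, pvLfB, pvPar] at p1 p3 p5
    have hLo : L % 2 = 1 := p5
    simp only [hLo] at hpar; norm_num at hpar
    rw [if_pos (show ((L : Int) % 2 ≠ 0) by omega)]
    by_cases hlc : lc = 'G'
    · rw [if_pos hlc]
      simp only [hlc] at p1 p3
      norm_num at p1 p3
      by_cases hA : gE + gO > bE + bO + 1 ∨ bE + bO > gE + gO + 1
      · rw [if_pos hA,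
          if_neg (show ¬ r.1.1 = r.1.2.2.2 by omega),
          if_neg (show ¬ r.1.2.2.2 = r.1.1 + 1 by omega)]
      · rw [if_neg hA]
        by_cases hgg : r.1.1 = r.1.2.2.2
        · rw [if_pos hgg, if_pos (show gE + gO > bE + bO by omega)]
          omega
        · rw [if_neg hgg, if_pos (show r.1.2.2.2 = r.1.1 + 1 by omega),
            if_neg (show ¬ gE + gO > bE + bO by omega)]
          omega
    · rw [if_neg hlc]
      simp only [hlc] at p1 p3
      norm_num at p1 p3
      by_cases hA : gE + gO > bE + bO + 1 ∨ bE + bO > gE + gO + 1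
      · rw [if_pos hA,
          if_neg (show ¬ r.1.1 = r.1.2.2.2 by omega),
          if_neg (show ¬ r.1.1 = r.1.2.2.2 + 1 by omega)]
      · rw [if_neg hA]
        by_cases hgg : r.1.1 = r.1.2.2.2
        · rw [if_pos hgg, if_neg (show ¬ gE + gO > bE + bO by omega)]
          omega
        · rw [if_neg hgg, if_pos (show r.1.1 = r.1.2.2.2 + 1 by omega),
            if_pos (show gE + gO > bE + bO by omega)]
          omega
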